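-- pv_equiv track=rewrite | github.com/invariantcontinuum/substrate | packages/substrate-graph-builder/src/substrate_graph_builder/plugins/rust.py | _resolve_rust_use
-- ===== SOURCE A (Python) =====
-- def _resolve_rust_use(path: str, src_dir: str, known_files: set[str]) -> str | None:
--     parts = path.split("::")
--     if parts and parts[0] in ("crate", "self", "super"):
--         parts = parts[1:]
--     if not parts:
--         return None
--     rel = "/".join(parts)
--     candidates = [
--         f"{src_dir}/{rel}.rs",
--         f"{src_dir}/{rel}/mod.rs",
--         f"{rel}.rs",
--         f"{rel}/mod.rs",
--         f"src/{rel}.rs",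
--         f"src/{rel}/mod.rs",
--     ]
--     for c in candidates:
--         c = c.lstrip("/")
--         if c in known_files:
--             return c
--     # try with the last segment dropped (for `use a::b::{c, d}` edge captures)
--     if len(parts) > 1:
--         return _resolve_rust_use("::".join(parts[:-1]), src_dir, known_files)
--     return None
-- ===== SOURCE B (Python) =====
-- def _resolve_rust_use(path: str, src_dir: str, known_files: set[str]) -> str | None:
--     while True:
--         parts = path.split("::")
--         if parts[0] in ("crate", "self", "super"):
--             parts = parts[1:]
--         if not parts:
--             return None
--         rel = "/".join(parts)
--         for prefix in (src_dir + "/", "", "src/"):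
--             for suffix in (".rs", "/mod.rs"):
--                 cand = (prefix + rel + suffix).lstrip("/")
--                 if cand in known_files:
--                     return cand
--         if len(parts) == 1:
--             return None
--         path = "::".join(parts[:-1])
-- ===== Notes on version B (the rewrite author's own statement) =====
-- stated objective: alternative
-- what changed: Replaced the tail recursion plus an explicit six-element candidate list with a while loop over the path string whose candidates are generated by a nested prefix/suffix product loop.
import Mathlib
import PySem

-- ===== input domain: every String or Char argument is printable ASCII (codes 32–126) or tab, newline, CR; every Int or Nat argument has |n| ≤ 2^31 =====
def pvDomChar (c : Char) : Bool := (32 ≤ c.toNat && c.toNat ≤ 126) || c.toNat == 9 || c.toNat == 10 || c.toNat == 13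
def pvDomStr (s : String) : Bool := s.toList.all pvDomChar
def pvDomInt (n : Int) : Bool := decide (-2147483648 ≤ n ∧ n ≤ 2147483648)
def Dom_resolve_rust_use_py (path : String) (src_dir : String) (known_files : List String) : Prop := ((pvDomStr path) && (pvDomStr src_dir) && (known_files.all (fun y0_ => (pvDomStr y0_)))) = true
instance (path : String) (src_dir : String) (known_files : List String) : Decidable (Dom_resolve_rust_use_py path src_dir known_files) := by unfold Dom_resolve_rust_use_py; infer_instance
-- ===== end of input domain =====

-- B replaces A's tail recursion + explicit six-element candidate list with a while loop over the
-- path string that generates the candidates from a nested prefix/suffix product (objective: alternative).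

-- exact port of str.lstrip("/") for the single-character strip set "/"
def pvLstripSlash (s : String) : String := String.ofList (s.toList.dropWhile (fun c => c == '/'))

-- ===== PORT A =====
-- A's `for c in candidates: c = c.lstrip("/"); if c in known_files: return c`
def pvACand : List String → List String → Option String
  | [], _ => none
  | c :: rest, known =>
    let c := pvLstripSlash c
    if known.contains c then some c else pvACand rest known

-- A's recursion, made total with a fuel counter (fuel only guards termination; it is never
-- exhausted when called with path.length + 1, since each recursive call strictly shortens path)
def pvAGo : Nat → String → String → List String → Option String
  | 0, _, _, _ => none
  | fuel + 1, path, src_dir, known_files =>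
    let parts := (PySem.Str.split? path "::").getD []
    let parts :=
      if (!parts.isEmpty) && (parts.headD "" == "crate" || parts.headD "" == "self" || parts.headD "" == "super") then
        PySem.List.slice parts (some 1) none
      else parts
    if parts.isEmpty then none
    else
      let rel := PySem.Str.join "/" parts
      let candidates := [src_dir ++ "/" ++ rel ++ ".rs", src_dir ++ "/" ++ rel ++ "/mod.rs",
                         rel ++ ".rs", rel ++ "/mod.rs", "src/" ++ rel ++ ".rs", "src/" ++ rel ++ "/mod.rs"]
      match pvACand candidates known_files with
      | some c => some c
      | none =>
        if parts.length > 1 then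
          pvAGo fuel (PySem.Str.join "::" (PySem.List.slice parts none (some (-1)))) src_dir known_files
        else none

def resolve_rust_use_py (path : String) (src_dir : String) (known_files : List String) : Option String :=
  pvAGo (path.length + 1) path src_dir known_files

-- ===== PORT B =====
-- B's inner `for suffix in (".rs", "/mod.rs")` loop
def pvBSuf (pre : String) (rel : String) (known : List String) : List String → Option String
  | [] => none
  | suf :: rest =>
    let cand := pvLstripSlash (pre ++ rel ++ suf)
    if known.contains cand then some cand else pvBSuf pre rel known rest

-- B's outer `for prefix in (src_dir + "/", "", "src/")` loop
def pvBPre (rel : String) (known : List String) : List String → Option String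
  | [] => none
  | pre :: rest =>
    match pvBSuf pre rel known [".rs", "/mod.rs"] with
    | some c => some c
    | none => pvBPre rel known rest

-- B's `while True` loop, fuel-guarded exactly as A's recursion
def pvBGo : Nat → String → String → List String → Option String
  | 0, _, _, _ => none
  | fuel + 1, path, src_dir, known_files =>
    let parts := (PySem.Str.split? path "::").getD []
    let parts :=
      if parts.headD "" == "crate" || parts.headD "" == "self" || parts.headD "" == "super" then
        parts.drop 1
      else parts
    if parts.isEmpty then none
    else
      let rel := PySem.Str.join "/" parts
      match pvBPre rel known_files [src_dir ++ "/", "", "src/"] with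
      | some c => some c
      | none =>
        if parts.length == 1 then none
        else pvBGo fuel (PySem.Str.join "::" (PySem.List.slice parts none (some (-1)))) src_dir known_files

def resolve_rust_use_py_alt (path : String) (src_dir : String) (known_files : List String) : Option String :=
  pvBGo (path.length + 1) path src_dir known_files

-- ===== PRECONDITION & SPEC =====
def Spec_resolve_rust_use_py (path : String) (src_dir : String) (known_files : List String) (out : Option String) : Prop := out = resolve_rust_use_py_alt path src_dir known_files
instance (path : String) (src_dir : String) (known_files : List String) (out : Option String) : Decidable (Spec_resolve_rust_use_py path src_dir known_files out) := by unfold Spec_resolve_rust_use_py; infer_instance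

-- ===== CLAIM (what is proved, stated in full; the proofs are below) =====
def Claim_equal_resolve_rust_use_py : Prop := ∀ (path : String) (src_dir : String) (known_files : List String), Dom_resolve_rust_use_py path src_dir known_files → Spec_resolve_rust_use_py path src_dir known_files (resolve_rust_use_py path src_dir known_files)

-- ===== LEMMAS AND PROOFS =====

-- the six candidates A lists are B's prefix/suffix product, scanned in the same order
lemma pvScanEq (src_dir rel : String) (known : List String) :
    pvBPre rel known [src_dir ++ "/", "", "src/"] =
      pvACand [src_dir ++ "/" ++ rel ++ ".rs", src_dir ++ "/" ++ rel ++ "/mod.rs",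
               rel ++ ".rs", rel ++ "/mod.rs", "src/" ++ rel ++ ".rs", "src/" ++ rel ++ "/mod.rs"] known := by
  simp only [pvBPre, pvBSuf, pvACand, String.append_assoc, String.empty_append]
  split_ifs <;> rfl

-- A's guarded keyword strip equals B's headD-based one (on [] both leave the list unchanged)
lemma pvPartsEq (parts : List String) :
    (if (!parts.isEmpty) && (parts.headD "" == "crate" || parts.headD "" == "self" || parts.headD "" == "super") then
       PySem.List.slice parts (some 1) none
     else parts) =
    (if parts.headD "" == "crate" || parts.headD "" == "self" || parts.headD "" == "super" then
       parts.drop 1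
     else parts) := by
  cases parts with
  | nil => simp
  | cons p0 rest => simp [PySem.List.slice_from]

-- one loop level of A equals one of B, given equality at the next level
lemma pvStep (n : Nat) (src_dir : String) (known_files : List String)
    (ih : ∀ p, pvAGo n p src_dir known_files = pvBGo n p src_dir known_files)
    (parts : List String) :
    (if parts.isEmpty then none
     else
       let rel := PySem.Str.join "/" parts
       match pvACand [src_dir ++ "/" ++ rel ++ ".rs", src_dir ++ "/" ++ rel ++ "/mod.rs",
                      rel ++ ".rs", rel ++ "/mod.rs", "src/" ++ rel ++ ".rs", "src/" ++ rel ++ "/mod.rs"] known_files with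
       | some c => some c
       | none =>
         if parts.length > 1 then
           pvAGo n (PySem.Str.join "::" (PySem.List.slice parts none (some (-1)))) src_dir known_files
         else none)
    =
    (if parts.isEmpty then none
     else
       let rel := PySem.Str.join "/" parts
       match pvBPre rel known_files [src_dir ++ "/", "", "src/"] with
       | some c => some c
       | none =>
         if parts.length == 1 then none
         else pvBGo n (PySem.Str.join "::" (PySem.List.slice parts none (some (-1)))) src_dir known_files) := by
  rcases parts with _ | ⟨p, ps⟩
  · rfl
  · simp only [List.isEmpty_cons, Bool.false_eq_true, if_false, pvScanEq]
    cases pvACand _ known_files with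
    | some c => rfl
    | none =>
      rcases ps with _ | ⟨q, qs⟩
      · rfl
      · simp [ih]

lemma pvGoEq (fuel : Nat) (path src_dir : String) (known_files : List String) :
    pvAGo fuel path src_dir known_files = pvBGo fuel path src_dir known_files := by
  induction fuel generalizing path with
  | zero => rfl
  | succ n ih =>
    simp only [pvAGo, pvBGo]
    rw [pvPartsEq]
    exact pvStep n src_dir known_files ih _

-- ===== VERDICT (by name: the statement is the Claim_ definition above) =====
theorem resolve_rust_use_py_spec : Claim_equal_resolve_rust_use_py := by
  intro path src_dir known_files _
  unfold Spec_resolve_rust_use_py resolve_rust_use_py resolve_rust_use_py_alt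
  exact pvGoEq _ _ _ _
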